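-- pv_equiv track=rewrite | github.com/tymm/Classification-of-Temporal-Relations-with-Global-Constraints | parsexml/sentence.py | _get_aux_of_verb
-- ===== SOURCE A (Python) =====
-- def _get_aux_of_verb(verb, info):
--     dependencies = info['sentences'][0]['dependencies']
--
--     sources = [x[1] for x in dependencies]
--
--     # Find index of verb in targets
--     index = None
--     for i, source in enumerate(sources):
--         if source == verb and dependencies[i][0] == "aux":
--             index = i
--
--     # Get aux
--     if index is None:
--         # Not every verb has an aux
--         return None
--     else:
--         aux = dependencies[index][2]
--
--         return aux
-- ===== SOURCE B (Python) =====
-- def _get_aux_of_verb(verb, info):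
--     for dep in reversed(info['sentences'][0]['dependencies']):
--         if dep[0] == "aux" and dep[1] == verb:
--             return dep[2]
--     return None
-- ===== Notes on version B (the rewrite author's own statement) =====
-- stated objective: simpler
-- what changed: B drops the extracted sources list and the last-match index bookkeeping: it scans the dependency list in reverse and returns the first match's target immediately (early exit), instead of a full forward scan remembering the last matching index and re-indexing afterwards.
import Mathlib
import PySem

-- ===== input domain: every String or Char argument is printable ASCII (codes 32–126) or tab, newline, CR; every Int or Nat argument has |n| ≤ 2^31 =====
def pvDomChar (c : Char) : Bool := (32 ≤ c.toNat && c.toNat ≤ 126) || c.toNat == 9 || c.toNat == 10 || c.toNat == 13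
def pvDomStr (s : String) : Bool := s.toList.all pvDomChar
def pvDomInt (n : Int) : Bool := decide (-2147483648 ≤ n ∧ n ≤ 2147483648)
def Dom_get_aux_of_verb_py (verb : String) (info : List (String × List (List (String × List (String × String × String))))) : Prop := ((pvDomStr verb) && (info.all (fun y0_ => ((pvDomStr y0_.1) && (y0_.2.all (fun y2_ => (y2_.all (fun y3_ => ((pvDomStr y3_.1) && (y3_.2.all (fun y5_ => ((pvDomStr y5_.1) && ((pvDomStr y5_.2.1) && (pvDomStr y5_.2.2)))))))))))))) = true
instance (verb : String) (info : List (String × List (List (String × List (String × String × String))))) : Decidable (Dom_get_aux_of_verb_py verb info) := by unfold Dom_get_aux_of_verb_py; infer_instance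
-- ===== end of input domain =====

-- B replaces A's full forward scan (sources list + last-match index) by a reverse scan
-- returning the first match's target immediately; objective: simpler.

-- ===== PORT A =====
def get_aux_of_verb_py (verb : String) (info : List (String × List (List (String × List (String × String × String))))) : Option String :=
  match info.lookup "sentences" with
  | none => none   -- KeyError (excluded by Pre_)
  | some sents =>
    match PySem.List.pyGet? sents 0 with
    | none => none   -- IndexError (excluded by Pre_)
    | some s0 =>
      match s0.lookup "dependencies" with
      | none => none   -- KeyError (excluded by Pre_)
      | some deps =>
        let sources := deps.map (fun x => x.2.1)
        let index : Option Int :=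
          (PySem.List.enumerate sources).foldl
            (fun idx p =>
              if p.2 == verb && ((PySem.List.pyGet? deps p.1).map (fun d => d.1) == some "aux")
              then some p.1 else idx) none
        match index with
        | none => none
        | some i => (PySem.List.pyGet? deps i).map (fun d => d.2.2)

-- ===== PORT B =====
def get_aux_of_verb_py_alt (verb : String) (info : List (String × List (List (String × List (String × String × String))))) : Option String :=
  match info.lookup "sentences" with
  | none => none   -- KeyError (excluded by Pre_)
  | some sents =>
    match PySem.List.pyGet? sents 0 with
    | none => none   -- IndexError (excluded by Pre_)
    | some s0 =>
      match s0.lookup "dependencies" with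
      | none => none   -- KeyError (excluded by Pre_)
      | some deps =>
        deps.reverse.findSome?
          (fun d => if d.1 == "aux" && d.2.1 == verb then some d.2.2 else none)

-- ===== PRECONDITION & SPEC =====
-- Pre_ excludes exactly the inputs where A raises: a missing 'sentences' key (KeyError),
-- an empty sentences list (IndexError), or a first sentence without 'dependencies' (KeyError).
def Pre_get_aux_of_verb_py (verb : String) (info : List (String × List (List (String × List (String × String × String))))) : Prop :=
  (match info.lookup "sentences" with
   | some (s0 :: _) => (s0.lookup "dependencies").isSome
   | _ => false) = true
instance (verb : String) (info : List (String × List (List (String × List (String × String × String))))) : Decidable (Pre_get_aux_of_verb_py verb info) := by unfold Pre_get_aux_of_verb_py; infer_instance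

def pvWitness_get_aux_of_verb_py : String × (List (String × List (List (String × List (String × String × String))))) :=
  ("run", [("sentences", [[("dependencies", [("aux", "run", "is")])]])])

def Spec_get_aux_of_verb_py (verb : String) (info : List (String × List (List (String × List (String × String × String))))) (out : Option String) : Prop := out = get_aux_of_verb_py_alt verb info
instance (verb : String) (info : List (String × List (List (String × List (String × String × String))))) (out : Option String) : Decidable (Spec_get_aux_of_verb_py verb info out) := by unfold Spec_get_aux_of_verb_py; infer_instance

-- ===== CLAIM (what is proved, stated in full; the proofs are below) =====
def Claim_equal_get_aux_of_verb_py : Prop := ∀ (verb : String) (info : List (String × List (List (String × List (String × String × String))))), Dom_get_aux_of_verb_py verb info → Pre_get_aux_of_verb_py verb info → Spec_get_aux_of_verb_py verb info (get_aux_of_verb_py verb info)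

-- ===== LEMMAS AND PROOFS =====

-- A's loop, restated on the dependency list directly (sources list and pyGet? eliminated).
def pvIdxPure (verb : String) (deps : List (String × String × String)) : Option Int :=
  (PySem.List.enumerate deps).foldl
    (fun idx p => if p.2.2.1 == verb && p.2.1 == "aux" then some p.1 else idx) none

lemma pvEnumerate_map {α β : Type} (g : α → β) (xs : List α) (s : Int) :
    PySem.List.enumerate (xs.map g) s = (PySem.List.enumerate xs s).map (fun p => (p.1, g p.2)) := by
  induction xs generalizing s with
  | nil => simp [PySem.List.enumerate_nil]
  | cons x xs ih => simp [PySem.List.enumerate_cons, ih]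

lemma pvIdx_loop_eq (verb : String) (deps : List (String × String × String)) :
    (PySem.List.enumerate (deps.map (fun x => x.2.1))).foldl
      (fun idx p =>
        if p.2 == verb && ((PySem.List.pyGet? deps p.1).map (fun d => d.1) == some "aux")
        then some p.1 else idx) none
    = pvIdxPure verb deps := by
  rw [pvEnumerate_map, List.foldl_map, pvIdxPure]
  apply PySem.List.foldl_congr_mem
  intro acc p hp
  rcases (PySem.List.mem_enumerate_iff _ _ _).1 hp with ⟨k, hk, rfl⟩
  simp [hk]

lemma pvIdxPure_bound (verb : String) :
    ∀ (xs : List (String × String × String)) (s : Int) (acc : Option Int) (i : Int),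
      (PySem.List.enumerate xs s).foldl
        (fun idx p => if p.2.2.1 == verb && p.2.1 == "aux" then some p.1 else idx) acc = some i →
      acc = some i ∨ (s ≤ i ∧ i < s + xs.length) := by
  intro xs
  induction xs with
  | nil => intro s acc i h; left; simpa [PySem.List.enumerate_nil] using h
  | cons x xs ih =>
    intro s acc i h
    rw [PySem.List.enumerate_cons] at h
    simp only [List.foldl_cons] at h
    rcases ih (s + 1) _ i h with h' | ⟨h1, h2⟩
    · by_cases hc : (x.2.1 == verb && x.1 == "aux") = true
      · rw [if_pos hc] at h'
        right
        have hsi : s = i := Option.some.inj h'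
        simp only [List.length_cons]
        push_cast
        omega
      · rw [if_neg hc] at h'
        left; exact h'
    · right
      constructor
      · omega
      · simp only [List.length_cons]
        push_cast
        omega

lemma pvCore (verb : String) (deps : List (String × String × String)) :
    (match pvIdxPure verb deps with
     | none => none
     | some i => (PySem.List.pyGet? deps i).map (fun d => d.2.2))
    = deps.reverse.findSome?
        (fun d => if d.1 == "aux" && d.2.1 == verb then some d.2.2 else none) := by
  induction deps using List.reverseRecOn with
  | nil => simp [pvIdxPure, PySem.List.enumerate_nil]
  | append_singleton ds d ih =>
    rw [List.reverse_append]
    simp only [List.reverse_cons, List.reverse_nil, List.nil_append, List.singleton_append,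
      List.findSome?_cons]
    have hidx : pvIdxPure verb (ds ++ [d])
        = if d.2.1 == verb && d.1 == "aux" then some (0 + (ds.length : Int)) else pvIdxPure verb ds := by
      rw [pvIdxPure, PySem.List.enumerate_append, List.foldl_append]
      simp [pvIdxPure, PySem.List.enumerate_cons]
    by_cases hc : (d.2.1 == verb && d.1 == "aux") = true
    · have hf : (if d.1 == "aux" && d.2.1 == verb then some d.2.2 else none) = some d.2.2 := by
        rw [Bool.and_comm] at hc; simp [hc]
      rw [hf, hidx, if_pos hc]
      simp
    · have hf : (if d.1 == "aux" && d.2.1 == verb then some d.2.2 else none) = none := by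
        rw [Bool.and_comm] at hc; simp [hc]
      rw [hf, hidx, if_neg hc, ← ih]
      cases hi : pvIdxPure verb ds with
      | none => simp
      | some i =>
        rcases pvIdxPure_bound verb ds 0 none i hi with h | ⟨h1, h2⟩
        · simp at h
        · have hk : i = (i.toNat : Int) := by omega
          have hklt : i.toNat < ds.length := by omega
          have : PySem.List.pyGet? (ds ++ [d]) i = PySem.List.pyGet? ds i := by
            rw [hk, PySem.List.pyGet?_natCast, PySem.List.pyGet?_natCast,
              List.getElem?_append_left hklt]
          simp [this]

-- ===== VERDICT (by name: the statement is the Claim_ definition above) =====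
theorem get_aux_of_verb_py_spec : Claim_equal_get_aux_of_verb_py := by
  intro verb info _ hpre
  unfold Spec_get_aux_of_verb_py get_aux_of_verb_py get_aux_of_verb_py_alt
  unfold Pre_get_aux_of_verb_py at hpre
  cases hs : info.lookup "sentences" with
  | none => rw [hs] at hpre
  | some sents =>
    rw [hs] at hpre
    cases sents with
    | nil => simp at hpre
    | cons s0 rest =>
      have hget : PySem.List.pyGet? (s0 :: rest) (0 : Int) = some s0 := by
        simp [PySem.List.pyGet?, PySem.List.pyIdx?]
      simp only [hget]
      cases hd : s0.lookup "dependencies" with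
      | none => rfl
      | some deps => simpa only [pvIdx_loop_eq] using pvCore verb deps
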